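-- pv_equiv track=rewrite | github.com/Eugene-q/netology_exercises | 2_3/news_mining.py | to_rate
-- ===== SOURCE A (Python) =====
-- def to_rate(words):
--   rated_words = list()
--   ratings = list()
--   for word in words:
--     if word not in rated_words:
--       rated_words.append(word)
--       ratings.append(words.count(word))
--   return dict(zip(ratings, rated_words))
-- ===== SOURCE B (Python) =====
-- def to_rate(words):
--     result = {}
--     while words:
--         word = words[0]
--         rest = [x for x in words[1:] if x != word]
--         result[len(words) - len(rest)] = word
--         words = rest
--     return result
-- ===== Notes on version B (the rewrite author's own statement) =====
-- stated objective: alternative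
-- what changed: Replaces A's seen-list dedup loop with words.count scans by repeated partitioning: each round takes the first remaining word, filters out all its occurrences, derives its count from the length difference, and continues on the shrunken list.
import Mathlib
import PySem

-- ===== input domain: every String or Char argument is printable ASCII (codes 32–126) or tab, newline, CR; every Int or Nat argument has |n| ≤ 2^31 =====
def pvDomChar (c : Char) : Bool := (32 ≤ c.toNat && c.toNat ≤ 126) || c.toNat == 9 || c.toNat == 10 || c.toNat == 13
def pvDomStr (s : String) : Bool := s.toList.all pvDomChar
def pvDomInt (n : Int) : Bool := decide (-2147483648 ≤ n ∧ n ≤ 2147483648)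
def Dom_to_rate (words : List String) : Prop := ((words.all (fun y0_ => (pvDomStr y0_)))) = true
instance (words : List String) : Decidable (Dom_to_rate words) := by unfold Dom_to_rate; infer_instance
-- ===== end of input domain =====

-- B replaces A's seen-list dedup loop (with a words.count scan per new word) by repeated
-- partitioning: take the first remaining word, filter out all its occurrences, read its count
-- off the length difference, continue on the shrunken list; return values proved equal.

-- ===== PORT A =====
-- for word in words: if word not in rated_words: append word; append words.count(word)
def to_rate (words : List String) : List (Int × String) :=
  let p := words.foldl
    (fun (p : List String × List Int) word =>
      if word ∈ p.1 then p
      else (p.1 ++ [word], p.2 ++ [(PySem.List.count words word : Int)]))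
    ([], [])
  (PySem.Dict.ofList (p.2.zip p.1)).items

-- ===== PORT B =====
-- while words: word = words[0]; rest = [x for x in words[1:] if x != word];
--              result[len(words) - len(rest)] = word; words = rest
def to_rate_alt_go (words : List String) (result : PySem.Dict Int String) : PySem.Dict Int String :=
  match words with
  | [] => result
  | word :: tl =>
      let rest := tl.filter (fun x => x != word)
      to_rate_alt_go rest (result.insert (((word :: tl).length : Int) - rest.length) word)
termination_by words.length
decreasing_by simpa using Nat.lt_succ_of_le (List.length_filter_le _ _)

def to_rate_alt (words : List String) : List (Int × String) :=
  (to_rate_alt_go words PySem.Dict.empty).items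

-- ===== PRECONDITION & SPEC =====
def Spec_to_rate (words : List String) (out : List (Int × String)) : Prop := out = to_rate_alt words
instance (words : List String) (out : List (Int × String)) : Decidable (Spec_to_rate words out) := by unfold Spec_to_rate; infer_instance

-- ===== CLAIM (what is proved, stated in full; the proofs are below) =====
def Claim_equal_to_rate : Prop := ∀ (words : List String), Dom_to_rate words → Spec_to_rate words (to_rate words)

-- ===== LEMMAS AND PROOFS =====

-- A's loop state: rated_words is a dedup set, ratings its image under w ↦ count words w.
theorem to_rate_loop_inv (f : String → Int) (l : List String) (s : List String) :
    l.foldl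
      (fun (p : List String × List Int) word =>
        if word ∈ p.1 then p else (p.1 ++ [word], p.2 ++ [f word]))
      (s, s.map f)
    = (PySem.Set.update s l, (PySem.Set.update s l).map f) := by
  induction l generalizing s with
  | nil => simp [PySem.Set.update]
  | cons x xs ih =>
    simp only [List.foldl_cons]
    by_cases hx : x ∈ s
    · simpa [hx, PySem.Set.update_cons, PySem.Set.add, hx] using ih s
    · have : (s ++ [x]).map f = s.map f ++ [f x] := by simp
      rw [if_neg hx, ← this, ih (s ++ [x])]
      simp [PySem.Set.update_cons, PySem.Set.add, hx]

theorem zip_map_self (f : String → Int) (l : List String) :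
    (l.map f).zip l = l.map (fun w => (f w, w)) := by
  induction l with
  | nil => rfl
  | cons x xs ih => simp [ih]

theorem set_add_cons (s : List String) (w x : String) (hx : x ≠ w) :
    PySem.Set.add (w :: s) x = w :: PySem.Set.add s x := by
  simp only [PySem.Set.add, PySem.Set.contains]
  split_ifs with h1 h2 h2 <;> simp_all

theorem set_ofList_append_singleton (l : List String) (x : String) :
    PySem.Set.ofList (l ++ [x]) = PySem.Set.add (PySem.Set.ofList l) x := by
  rw [PySem.Set.ofList_append]; simp [PySem.Set.update]

-- dedup-first commutes with peeling off all occurrences of the head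
theorem set_ofList_cons_filter (w : String) (tl : List String) :
    PySem.Set.ofList (w :: tl) = w :: PySem.Set.ofList (tl.filter (fun x => x != w)) := by
  induction tl using List.reverseRecOn with
  | nil => simp [PySem.Set.ofList, PySem.Set.add, PySem.Set.contains]
  | append_singleton l x ih =>
    have hcons : w :: (l ++ [x]) = (w :: l) ++ [x] := by simp
    rw [hcons, set_ofList_append_singleton, ih]
    by_cases hx : x = w
    · subst hx
      have hf : (l ++ [x]).filter (fun y => y != x) = l.filter (fun y => y != x) := by simp
      rw [hf]
      simp [PySem.Set.add, PySem.Set.contains]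
    · have hf : (l ++ [x]).filter (fun y => y != w) = l.filter (fun y => y != w) ++ [x] := by
        simp [List.filter_append, hx]
      rw [hf, set_ofList_append_singleton, set_add_cons _ _ _ hx]

theorem countP_add_countP_not (p : String → Bool) (l : List String) :
    l.countP p + l.countP (fun x => !p x) = l.length := by
  induction l with
  | nil => rfl
  | cons a l ih => by_cases h : p a <;> simp [h] <;> omega

theorem count_head_eq (w : String) (tl : List String) :
    (((w :: tl).length : Int) - (tl.filter (fun x => x != w)).length)
      = ((w :: tl).count w : Int) := by
  have h := countP_add_countP_not (fun x => x == w) tl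
  simp only [← List.countP_eq_length_filter] at *
  have hc : tl.count w = tl.countP (fun x => x == w) := rfl
  have hl : (w :: tl).count w = tl.count w + 1 := by simp
  have hlen : (w :: tl).length = tl.length + 1 := rfl
  have hf : tl.countP (fun x => x != w) = tl.countP (fun x => !(x == w)) := by
    apply List.countP_congr; intro a _; simp [bne]
  omega

theorem count_rest_eq (w u : String) (tl : List String) (hu : u ≠ w) :
    (w :: tl).count u = (tl.filter (fun x => x != w)).count u := by
  rw [List.count_filter (by simpa [bne] using hu)]
  simp [Ne.symm hu]

-- B's loop computes: fold-insert (count, word) over the dedup list of words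
theorem to_rate_alt_go_eq_aux (n : Nat) : ∀ (words : List String), words.length ≤ n →
    ∀ (d : PySem.Dict Int String),
    to_rate_alt_go words d
      = ((PySem.Set.ofList words).map
          (fun w => ((words.count w : Int), w))).foldl
            (fun d p => d.insert p.1 p.2) d := by
  induction n with
  | zero =>
    intro words h d
    match words with
    | [] => rw [to_rate_alt_go]; simp [PySem.Set.ofList]
    | w :: tl => simp at h
  | succ n ih =>
    intro words h d
    match words with
    | [] => rw [to_rate_alt_go]; simp [PySem.Set.ofList]
    | w :: tl =>
      rw [to_rate_alt_go]
      have hlen : (tl.filter (fun x => x != w)).length ≤ n := by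
        have := List.length_filter_le (fun x => x != w) tl
        simp at h; omega
      rw [ih _ hlen]
      rw [set_ofList_cons_filter, List.map_cons, List.foldl_cons]
      rw [count_head_eq]
      congr 1
      apply List.map_congr_left
      intro u hu
      have hmem : u ∈ tl.filter (fun x => x != w) := (PySem.Set.mem_ofList _ _).mp hu
      have hne : u ≠ w := by
        have := List.of_mem_filter hmem
        simpa [bne] using this
      rw [count_rest_eq w u tl hne]

theorem to_rate_alt_go_eq (words : List String) (d : PySem.Dict Int String) :
    to_rate_alt_go words d
      = ((PySem.Set.ofList words).map
          (fun w => ((words.count w : Int), w))).foldl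
            (fun d p => d.insert p.1 p.2) d :=
  to_rate_alt_go_eq_aux words.length words le_rfl d

-- ===== VERDICT (by name: the statement is the Claim_ definition above) =====

theorem to_rate_spec : Claim_equal_to_rate := by
  intro words _
  have hA := to_rate_loop_inv (fun w => (PySem.List.count words w : Int)) words []
  simp only [List.map_nil, PySem.List.count] at hA
  unfold Spec_to_rate to_rate to_rate_alt
  rw [to_rate_alt_go_eq]
  simp only [hA, PySem.Set.update_nil_left, zip_map_self, PySem.List.count]
  rfl
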